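-- pv_equiv track=rewrite | github.com/DeepuKr0315/Data-Structures-with-Problems-Solutions- | 9. Binary Search/First and Last Occurance/iterativeMethod.py | right_Extreme
-- ===== SOURCE A (Python) =====
-- def right_Extreme(nums, target):
--     left = 0
--     right = len(nums) - 1
--     while left <= right:
--         middle = (left + right) // 2
--         if nums[middle] == target:
--             if middle == len(nums)-1:
--                 return middle
--             elif nums[middle + 1] == target:
--                 left = middle + 1
--             else:
--                 return middle
--         elif target < nums[middle]:
--             right = middle - 1
--         else:
--             left = middle + 1
--     return-1
-- ===== SOURCE B (Python) =====
-- def right_Extreme(nums, target):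
--     for i in range(len(nums) - 1, -1, -1):
--         if nums[i] == target:
--             return i
--     return -1
-- ===== Notes on version B (the rewrite author's own statement) =====
-- stated objective: simpler
-- what changed: B replaces A's neighbor-peeking binary search with a plain reverse linear scan that returns the first index from the back whose element equals the target (-1 if none); no window, no midpoints, no neighbor peek.
-- outside the precondition, e.g. on right_Extreme([0, 1, 0, 1], 1): A returns 1, B returns 3
import Mathlib
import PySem

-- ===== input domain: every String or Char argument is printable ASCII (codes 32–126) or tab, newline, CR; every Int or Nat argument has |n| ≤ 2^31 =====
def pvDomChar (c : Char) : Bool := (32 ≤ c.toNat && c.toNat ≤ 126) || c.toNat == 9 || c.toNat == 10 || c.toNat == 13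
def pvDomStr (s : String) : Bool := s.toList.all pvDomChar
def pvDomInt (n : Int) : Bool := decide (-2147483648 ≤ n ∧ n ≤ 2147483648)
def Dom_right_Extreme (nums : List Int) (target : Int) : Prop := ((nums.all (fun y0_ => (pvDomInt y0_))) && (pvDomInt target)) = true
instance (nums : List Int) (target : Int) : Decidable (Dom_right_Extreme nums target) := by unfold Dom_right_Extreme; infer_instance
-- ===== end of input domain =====

-- B replaces A's neighbor-peeking binary search with a plain reverse linear scan
-- (first matching index from the back, -1 if none): simpler, but O(n) instead of O(log n).


-- ===== PORT A =====
-- nums[i] ; the index is always in range where the loops read it (0 ≤ left ≤ middle ≤ right < len),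
-- so the default of getD is never used and the port is exact.
def pvAt (nums : List Int) (i : Int) : Int := (PySem.List.pyGet? nums i).getD 0

def pvALoop (nums : List Int) (target : Int) (left right : Int) : Int :=
  if h : left ≤ right then
    let middle := PySem.Int.floordiv (left + right) 2
    if pvAt nums middle = target then
      if middle = (nums.length : Int) - 1 then middle
      else if pvAt nums (middle + 1) = target then
        pvALoop nums target (middle + 1) right
      else middle
    else if target < pvAt nums middle then
      pvALoop nums target left (middle - 1)
    else
      pvALoop nums target (middle + 1) right
  else -1
termination_by (right + 1 - left).toNat
decreasing_by
  all_goals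
    have := PySem.Int.floordiv_two_mid_bounds h
    omega

def right_Extreme (nums : List Int) (target : Int) : Int :=
  pvALoop nums target 0 ((nums.length : Int) - 1)

-- ===== PORT B =====
-- the loop 'for i in range(len(nums)-1, -1, -1)': argument n is the number of indices still
-- to visit; n = i+1 means the next index read is i, and n = 0 means the loop is exhausted.
def pvBScan (nums : List Int) (t : Int) : Nat → Int
  | 0 => -1
  | n + 1 => if pvAt nums (n : Int) = t then (n : Int) else pvBScan nums t n

def right_Extreme_alt (nums : List Int) (target : Int) : Int :=
  pvBScan nums target nums.length

-- ===== PRECONDITION & SPEC =====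
-- Pre_ excludes unsorted lists that contain the target: binary search's contract assumes a
-- nondecreasing list, and on such inputs (which both programs still return on) each result is
-- an accidental artefact of the probe order; unsorted lists NOT containing the target stay
-- inside (both programs return -1 there irrespective of order).
def Pre_right_Extreme (nums : List Int) (target : Int) : Prop :=
  nums.Pairwise (· ≤ ·) ∨ target ∉ nums
instance (nums : List Int) (target : Int) : Decidable (Pre_right_Extreme nums target) := by
  unfold Pre_right_Extreme; infer_instance

def pvWitness_right_Extreme : List Int × Int := ([1, 2, 2, 3], 2)

def Spec_right_Extreme (nums : List Int) (target : Int) (out : Int) : Prop := out = right_Extreme_alt nums target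
instance (nums : List Int) (target : Int) (out : Int) : Decidable (Spec_right_Extreme nums target out) := by unfold Spec_right_Extreme; infer_instance

-- ===== CLAIM (what is proved, stated in full; the proofs are below) =====
def Claim_equal_right_Extreme : Prop := ∀ (nums : List Int) (target : Int), Dom_right_Extreme nums target → Pre_right_Extreme nums target → Spec_right_Extreme nums target (right_Extreme nums target)

-- ===== LEMMAS AND PROOFS =====

-- rightmost occurrence index of t in nums (-1 if absent): the common value of both programs
def pvLastOcc (nums : List Int) (t : Int) : Int :=
  match nums with
  | [] => -1
  | x :: xs =>
      let r := pvLastOcc xs t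
      if 0 ≤ r then r + 1 else if x = t then 0 else -1

lemma pvLastOcc_spec (nums : List Int) (t : Int) :
    pvLastOcc nums t = -1 ∨
      (0 ≤ pvLastOcc nums t ∧ pvLastOcc nums t < nums.length ∧
        nums.getD (pvLastOcc nums t).toNat 0 = t) := by
  induction nums with
  | nil => left; rfl
  | cons x xs ih =>
      simp only [pvLastOcc]
      rcases ih with h | ⟨h0, hlt, hget⟩
      · rw [h]
        by_cases hx : x = t
        · right; simp [hx]
        · left; simp [hx]
      · rw [if_pos h0]
        right
        refine ⟨by omega, ?_, ?_⟩
        · simp only [List.length_cons]; push_cast; omega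
        · have ht : (pvLastOcc xs t + 1).toNat = (pvLastOcc xs t).toNat + 1 := by omega
          rw [ht]
          simpa using hget

lemma pvLastOcc_ge (nums : List Int) (t : Int) (j : Nat) (hj : j < nums.length)
    (ht : nums.getD j 0 = t) : (j : Int) ≤ pvLastOcc nums t := by
  induction nums generalizing j with
  | nil => simp at hj
  | cons x xs ih =>
      simp only [pvLastOcc]
      cases j with
      | zero =>
          simp at ht
          split_ifs <;> omega
      | succ k =>
          simp at hj
          have := ih k (by omega) (by simpa using ht)
          rw [if_pos (by omega)]
          omega

lemma pvLastOcc_notmem (nums : List Int) (t : Int) (hnot : t ∉ nums) :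
    pvLastOcc nums t = -1 := by
  rcases pvLastOcc_spec nums t with h | ⟨h0, hlt, hget⟩
  · exact h
  · exfalso
    rw [List.getD_eq_getElem nums 0 (show (pvLastOcc nums t).toNat < nums.length by omega)] at hget
    exact hnot (hget ▸ List.getElem_mem _)

-- sortedness: elementwise monotone access
lemma pv_sorted_le (nums : List Int) (hs : nums.Pairwise (· ≤ ·)) (i j : Nat)
    (hij : i ≤ j) (hj : j < nums.length) :
    nums.getD i 0 ≤ nums.getD j 0 := by
  rcases Nat.eq_or_lt_of_le hij with rfl | hlt
  · exact le_refl _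
  · have := (List.pairwise_iff_getElem.mp hs) i j (by omega) hj hlt
    rw [List.getD_eq_getElem nums 0 (by omega), List.getD_eq_getElem nums 0 hj]
    exact this

lemma pvAt_getD (nums : List Int) (i : Int) (h0 : 0 ≤ i) (h : i < nums.length) :
    pvAt nums i = nums.getD i.toNat 0 := by
  unfold pvAt
  rw [PySem.List.pyGet?_eq_some_getElem nums h0 h,
      List.getD_eq_getElem nums 0 (show i.toNat < nums.length by omega)]
  rfl

lemma pv_pres_facts (nums : List Int) (t : Int)
    (hex : ∃ j : Nat, j < nums.length ∧ nums.getD j 0 = t) :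
    0 ≤ pvLastOcc nums t ∧ pvLastOcc nums t < nums.length ∧
      nums.getD (pvLastOcc nums t).toNat 0 = t := by
  obtain ⟨j, hj, ht⟩ := hex
  have := pvLastOcc_ge nums t j hj ht
  rcases pvLastOcc_spec nums t with h | ⟨a, b, c⟩
  · omega
  · exact ⟨a, b, c⟩

-- B's scan: once the remaining indices all lie above pvLastOcc is impossible; precisely,
-- if pvLastOcc < n ≤ length then scanning indices n-1 … 0 finds exactly pvLastOcc.
lemma pvBScan_eq (nums : List Int) (t : Int) (n : Nat) (hn : n ≤ nums.length)
    (hlast : pvLastOcc nums t < (n : Int) ∨ pvLastOcc nums t = -1) :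
    pvBScan nums t n = pvLastOcc nums t := by
  induction n with
  | zero =>
      rcases pvLastOcc_spec nums t with h | ⟨h0, _, _⟩
      · simpa [pvBScan] using h.symm
      · rcases hlast with h | h <;> omega
  | succ k ih =>
      simp only [pvBScan]
      rw [pvAt_getD nums (k : Int) (by omega) (by omega)]
      by_cases hv : nums.getD ((k : Int)).toNat 0 = t
      · rw [if_pos hv]
        have hge := pvLastOcc_ge nums t k (by omega) (by simpa using hv)
        rcases hlast with h | h
        · omega
        · exfalso; omega
      · rw [if_neg hv]
        refine ih (by omega) ?_
        rcases pvLastOcc_spec nums t with h | ⟨h0, hlt, hget⟩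
        · right; exact h
        · left
          rcases hlast with h | h
          · have : pvLastOcc nums t ≠ (k : Int) := by
              intro he
              apply hv
              rw [← he] at *
              simpa using hget
            omega
          · omega

lemma pvALoop_eq (nums : List Int) (t : Int) (hs : nums.Pairwise (· ≤ ·))
    (left right : Int) (hl : 0 ≤ left) (hr : right ≤ (nums.length : Int) - 1)
    (hpres : (∃ j : Nat, j < nums.length ∧ nums.getD j 0 = t) →
      left ≤ pvLastOcc nums t ∧ pvLastOcc nums t ≤ right) :
    pvALoop nums t left right = pvLastOcc nums t := by
  revert hl hr hpres
  fun_induction pvALoop nums t left right with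
  | case1 left right hlr middle hv hm =>
      intro hl hr hpres
      have hmid : middle = PySem.Int.floordiv (left + right) 2 := rfl
      have hmb := PySem.Int.floordiv_two_mid_bounds hlr
      rw [← hmid] at hmb
      obtain ⟨hml, hmr⟩ := hmb
      have hm0 : 0 ≤ middle := le_trans hl hml
      have hmn : middle < (nums.length : Int) := by omega
      rw [pvAt_getD nums middle hm0 hmn] at hv
      have hp : ∃ j : Nat, j < nums.length ∧ nums.getD j 0 = t :=
        ⟨middle.toNat, by omega, hv⟩
      have hge := pvLastOcc_ge nums t middle.toNat (by omega) hv
      have := hpres hp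
      omega
  | case2 left right hlr middle hv hm hnext ih =>
      intro hl hr hpres
      have hmid : middle = PySem.Int.floordiv (left + right) 2 := rfl
      have hmb := PySem.Int.floordiv_two_mid_bounds hlr
      rw [← hmid] at hmb
      obtain ⟨hml, hmr⟩ := hmb
      have hm0 : 0 ≤ middle := le_trans hl hml
      have hmn : middle < (nums.length : Int) := by omega
      have hm1n : middle + 1 < (nums.length : Int) := by omega
      rw [pvAt_getD nums (middle + 1) (by omega) hm1n] at hnext
      have hp : ∃ j : Nat, j < nums.length ∧ nums.getD j 0 = t :=
        ⟨(middle + 1).toNat, by omega, hnext⟩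
      have hge := pvLastOcc_ge nums t (middle + 1).toNat (by omega) hnext
      have h2 := hpres hp
      exact ih (by omega) hr (fun _ => by omega)
  | case3 left right hlr middle hv hm hnext =>
      intro hl hr hpres
      have hmid : middle = PySem.Int.floordiv (left + right) 2 := rfl
      have hmb := PySem.Int.floordiv_two_mid_bounds hlr
      rw [← hmid] at hmb
      obtain ⟨hml, hmr⟩ := hmb
      have hm0 : 0 ≤ middle := le_trans hl hml
      have hmn : middle < (nums.length : Int) := by omega
      have hm1n : middle + 1 < (nums.length : Int) := by omega
      rw [pvAt_getD nums middle hm0 hmn] at hv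
      rw [pvAt_getD nums (middle + 1) (by omega) hm1n] at hnext
      have hp : ∃ j : Nat, j < nums.length ∧ nums.getD j 0 = t :=
        ⟨middle.toNat, by omega, hv⟩
      have hge := pvLastOcc_ge nums t middle.toNat (by omega) hv
      obtain ⟨hK0, hKn, hKget⟩ := pv_pres_facts nums t hp
      rcases eq_or_lt_of_le hge with he | hlt
      · omega
      · exfalso
        have hs1 : nums.getD (middle + 1).toNat 0 ≤ nums.getD (pvLastOcc nums t).toNat 0 :=
          pv_sorted_le nums hs _ _ (by omega) (by omega)
        have hs2 : nums.getD middle.toNat 0 ≤ nums.getD (middle + 1).toNat 0 :=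
          pv_sorted_le nums hs _ _ (by omega) (by omega)
        rw [hKget] at hs1
        rw [hv] at hs2
        exact hnext (le_antisymm hs1 hs2)
  | case4 left right hlr middle hv hgt ih =>
      intro hl hr hpres
      have hmid : middle = PySem.Int.floordiv (left + right) 2 := rfl
      have hmb := PySem.Int.floordiv_two_mid_bounds hlr
      rw [← hmid] at hmb
      obtain ⟨hml, hmr⟩ := hmb
      have hm0 : 0 ≤ middle := le_trans hl hml
      have hmn : middle < (nums.length : Int) := by omega
      rw [pvAt_getD nums middle hm0 hmn] at hgt
      refine ih hl (by omega) ?_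
      intro hp
      obtain ⟨hK0, hKn, hKget⟩ := pv_pres_facts nums t hp
      have h2 := hpres hp
      rcases le_or_gt middle (pvLastOcc nums t) with hc | hc
      · exfalso
        have := pv_sorted_le nums hs middle.toNat (pvLastOcc nums t).toNat (by omega) (by omega)
        rw [hKget] at this
        omega
      · omega
  | case5 left right hlr middle hv hngt ih =>
      intro hl hr hpres
      have hmid : middle = PySem.Int.floordiv (left + right) 2 := rfl
      have hmb := PySem.Int.floordiv_two_mid_bounds hlr
      rw [← hmid] at hmb
      obtain ⟨hml, hmr⟩ := hmb
      have hm0 : 0 ≤ middle := le_trans hl hml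
      have hmn : middle < (nums.length : Int) := by omega
      rw [pvAt_getD nums middle hm0 hmn] at hv hngt
      refine ih (by omega) hr ?_
      intro hp
      obtain ⟨hK0, hKn, hKget⟩ := pv_pres_facts nums t hp
      have h2 := hpres hp
      rcases le_or_gt (pvLastOcc nums t) middle with hc | hc
      · exfalso
        have := pv_sorted_le nums hs (pvLastOcc nums t).toNat middle.toNat (by omega) (by omega)
        rw [hKget] at this
        omega
      · omega
  | case6 left right hlr =>
      intro hl hr hpres
      rcases pvLastOcc_spec nums t with h | ⟨hK0, hKn, hKget⟩
      · omega
      · have := hpres ⟨(pvLastOcc nums t).toNat, by omega, hKget⟩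
        omega

lemma pvALoop_notmem (nums : List Int) (t : Int) (hnot : t ∉ nums)
    (left right : Int) (hl : 0 ≤ left) (hr : right ≤ (nums.length : Int) - 1) :
    pvALoop nums t left right = -1 := by
  revert hl hr
  fun_induction pvALoop nums t left right with
  | case1 left right hlr middle hv hm =>
      intro hl hr
      exfalso
      have hmid : middle = PySem.Int.floordiv (left + right) 2 := rfl
      have hmb := PySem.Int.floordiv_two_mid_bounds hlr
      rw [← hmid] at hmb
      have hm0 : 0 ≤ middle := by omega
      have hmn : middle < (nums.length : Int) := by omega
      rw [pvAt_getD nums middle hm0 hmn] at hv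
      rw [List.getD_eq_getElem nums 0 (show middle.toNat < nums.length by omega)] at hv
      exact hnot (hv ▸ List.getElem_mem _)
  | case2 left right hlr middle hv hm hnext ih =>
      intro hl hr
      exfalso
      have hmid : middle = PySem.Int.floordiv (left + right) 2 := rfl
      have hmb := PySem.Int.floordiv_two_mid_bounds hlr
      rw [← hmid] at hmb
      have hm0 : 0 ≤ middle := by omega
      have hmn : middle < (nums.length : Int) := by omega
      rw [pvAt_getD nums middle hm0 hmn] at hv
      rw [List.getD_eq_getElem nums 0 (show middle.toNat < nums.length by omega)] at hv
      exact hnot (hv ▸ List.getElem_mem _)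
  | case3 left right hlr middle hv hm hnext =>
      intro hl hr
      exfalso
      have hmid : middle = PySem.Int.floordiv (left + right) 2 := rfl
      have hmb := PySem.Int.floordiv_two_mid_bounds hlr
      rw [← hmid] at hmb
      have hm0 : 0 ≤ middle := by omega
      have hmn : middle < (nums.length : Int) := by omega
      rw [pvAt_getD nums middle hm0 hmn] at hv
      rw [List.getD_eq_getElem nums 0 (show middle.toNat < nums.length by omega)] at hv
      exact hnot (hv ▸ List.getElem_mem _)
  | case4 left right hlr middle hv hgt ih =>
      intro hl hr
      have hmid : middle = PySem.Int.floordiv (left + right) 2 := rfl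
      have hmb := PySem.Int.floordiv_two_mid_bounds hlr
      rw [← hmid] at hmb
      exact ih hl (by omega)
  | case5 left right hlr middle hv hngt ih =>
      intro hl hr
      have hmid : middle = PySem.Int.floordiv (left + right) 2 := rfl
      have hmb := PySem.Int.floordiv_two_mid_bounds hlr
      rw [← hmid] at hmb
      exact ih (by omega) hr
  | case6 left right hlr =>
      intro _ _
      rfl

theorem right_Extreme_spec : Claim_equal_right_Extreme := by
  intro nums t _hdom hpre
  unfold Spec_right_Extreme right_Extreme right_Extreme_alt
  have hB : pvBScan nums t nums.length = pvLastOcc nums t := by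
    refine pvBScan_eq nums t nums.length (le_refl _) ?_
    rcases pvLastOcc_spec nums t with h | ⟨h0, hlt, _⟩
    · right; exact h
    · left; omega
  rw [hB]
  rcases hpre with hs | hnot
  · refine pvALoop_eq nums t hs 0 _ (le_refl 0) (le_refl _) ?_
    rintro ⟨j, hj, ht⟩
    have h1 := pvLastOcc_ge nums t j hj ht
    rcases pvLastOcc_spec nums t with h | ⟨h0, hlt, _⟩ <;> omega
  · rw [pvALoop_notmem nums t hnot 0 _ (le_refl 0) (le_refl _),
        pvLastOcc_notmem nums t hnot]
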